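-- pv_equiv track=rewrite | github.com/kingspider/CodinGame | MIME Type.py | extension
-- ===== SOURCE A (Python) =====
-- def extension(filename):
--     """ Function takes a filename reverses it and then gets the extension. """
--     fileextention = ""
--     for char in filename:
--         if char == ".":
--             fileextention = fileextention[::-1]
--             return fileextention.lower()
--         else:
--             fileextention = fileextention + char
-- ===== SOURCE B (Python) =====
-- def extension(filename):
--     """ Function takes a filename reverses it and then gets the extension. """
--     i = filename.find('.')
--     if i == -1:
--         return None
--     return filename[:i][::-1].lower()
-- ===== Notes on version B (the rewrite author's own statement) =====
-- stated objective: faster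
-- what changed: Replaces the per-character accumulation loop (quadratic string concatenation) with str.find to locate the first dot, then a single slice-reverse-lower of the prefix (None when no dot exists).
import Mathlib
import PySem

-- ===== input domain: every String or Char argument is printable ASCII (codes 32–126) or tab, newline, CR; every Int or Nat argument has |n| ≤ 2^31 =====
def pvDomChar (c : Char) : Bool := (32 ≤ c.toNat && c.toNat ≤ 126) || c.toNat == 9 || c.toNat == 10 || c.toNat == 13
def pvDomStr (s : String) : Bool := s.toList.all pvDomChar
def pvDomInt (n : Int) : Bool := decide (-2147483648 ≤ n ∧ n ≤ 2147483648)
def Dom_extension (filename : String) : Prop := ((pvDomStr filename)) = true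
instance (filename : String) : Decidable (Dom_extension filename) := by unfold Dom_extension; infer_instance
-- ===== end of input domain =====

-- B replaces A's per-character accumulation loop by find-the-first-dot + slice/reverse/lower (objective: simpler).

-- ===== PORT A =====
-- for char in filename: if char == '.': return acc[::-1].lower() else acc = acc + char; falls off the end -> None
def extensionLoop : List Char → List Char → Option String
  | [], _ => none
  | c :: rest, acc =>
    if c = '.' then some (PySem.Str.lower (String.ofList acc.reverse))
    else extensionLoop rest (acc ++ [c])

def extension (filename : String) : Option String :=
  extensionLoop filename.toList []

-- ===== PORT B =====
-- i = filename.find('.'); None if i == -1 else filename[:i][::-1].lower()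
def extension_alt (filename : String) : Option String :=
  let i := PySem.Str.find filename "."
  if i = -1 then none
  else
    (PySem.Str.slice? (PySem.Str.slice filename none (some i)) none none (-1)).map PySem.Str.lower

-- ===== PRECONDITION & SPEC =====
def Spec_extension (filename : String) (out : Option String) : Prop := out = extension_alt filename
instance (filename : String) (out : Option String) : Decidable (Spec_extension filename out) := by unfold Spec_extension; infer_instance

-- ===== CLAIM (what is proved, stated in full; the proofs are below) =====
def Claim_equal_extension : Prop := ∀ (filename : String), Dom_extension filename → Spec_extension filename (extension filename)

-- ===== LEMMAS AND PROOFS =====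

lemma extensionLoop_no_dot : ∀ (l acc : List Char), (∀ c ∈ l, c ≠ '.') →
    extensionLoop l acc = none := by
  intro l
  induction l with
  | nil => intro acc _; rfl
  | cons c rest ih =>
    intro acc h
    have hc : c ≠ '.' := h c (List.mem_cons_self ..)
    simp [extensionLoop, hc]
    exact ih _ (fun x hx => h x (List.mem_cons_of_mem _ hx))

lemma extensionLoop_dot : ∀ (l : List Char) (acc : List Char) (n : Nat),
    (∀ i, i < n → l[i]? ≠ some '.') → l[n]? = some '.' →
    extensionLoop l acc = some (PySem.Str.lower (String.ofList ((acc ++ l.take n).reverse))) := by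
  intro l
  induction l with
  | nil => intro acc n _ hn; simp at hn
  | cons c rest ih =>
    intro acc n hlt hn
    cases n with
    | zero =>
      simp at hn
      simp [extensionLoop, hn]
    | succ m =>
      have hc : c ≠ '.' := by
        have := hlt 0 (Nat.succ_pos m)
        simpa using this
      have hrec := ih (acc ++ [c]) m
        (fun i hi => by
          have := hlt (i + 1) (Nat.succ_lt_succ hi)
          simpa using this)
        (by simpa using hn)
      simp [extensionLoop, hc, hrec, List.take_succ_cons]

-- singleton prefix of a list means its head is that char
lemma singleton_prefix_iff (xs : List Char) (c : Char) :
    [c] <+: xs ↔ xs.head? = some c := by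
  constructor
  · rintro ⟨t, rfl⟩; rfl
  · intro h
    cases xs with
    | nil => simp at h
    | cons x t => simp at h; exact ⟨t, by simp [h]⟩

-- ===== VERDICT (by name: the statement is the Claim_ definition above) =====
theorem extension_spec : Claim_equal_extension := by
  intro filename _
  unfold Spec_extension extension extension_alt
  have hdot : ("." : String).toList = ['.'] := rfl
  by_cases h : PySem.Str.find filename "." = -1
  · -- no dot anywhere: A's loop also returns none
    rw [h]
    simp only [if_pos]
    have h' : ¬ (['.'] : List Char) <:+: filename.toList := by
      have := (PySem.Str.find_eq_neg_one_iff filename ".").mp h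
      simpa [hdot] using this
    apply extensionLoop_no_dot
    intro c hc hceq
    subst hceq
    obtain ⟨u, v, huv⟩ := List.append_of_mem hc
    exact h' ⟨u, v, by simp [huv]⟩
  · -- a dot exists at the first index n = find
    have hfind : PySem.Str.find filename "." = PySem.Chars.find filename.toList ['.'] := by
      simp [PySem.Str.find_eq, hdot]
    have hge : 0 ≤ PySem.Chars.find filename.toList ['.'] := by
      have h1 := PySem.Chars.neg_one_le_find filename.toList ['.']
      have h2 : PySem.Chars.find filename.toList ['.'] ≠ -1 := by rw [← hfind]; exact h
      omega
    obtain ⟨hpre, hmin⟩ := PySem.Chars.find_spec hge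
    set n : Nat := (PySem.Chars.find filename.toList ['.']).toNat with hn
    have hAt : filename.toList[n]? = some '.' := by
      have := (singleton_prefix_iff _ '.').mp hpre
      simpa [List.head?_drop] using this
    have hBefore : ∀ i, i < n → filename.toList[i]? ≠ some '.' := by
      intro i hi hEq
      exact hmin i hi ((singleton_prefix_iff _ '.').mpr (by simpa [List.head?_drop] using hEq))
    rw [extensionLoop_dot filename.toList [] n hBefore hAt]
    rw [if_neg h, PySem.Str.slice?_none_none_neg_one]
    simp only [Option.map_some, Option.some.injEq]
    rw [PySem.Str.toList_slice, PySem.Chars.slice_eq_listSlice, hfind,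
      PySem.List.slice_to _ hge]
    rfl
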